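-- pv_equiv track=rewrite | github.com/SatwantKumar/amyloid-probability-adni | scripts/14_build_paperB_docx.py | _parse_efigure_legends
-- ===== SOURCE A (Python) =====
-- def _parse_efigure_legends(figure_legends_md: str) -> dict[str, str]:
--     """
--     Returns mapping like {"eFigure 1": "<legend text>", ...}.
--     """
--     out: dict[str, list[str]] = {}
--     current: str | None = None
--     for line in figure_legends_md.splitlines():
--         if line.startswith("## eFigure "):
--             current = line.removeprefix("## ").split(".", 1)[0].strip()
--             out[current] = []
--             continue
--         if current is None:
--             continue
--         out[current].append(line)
--
--     return {k: "\n".join(v).strip() for k, v in out.items()}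
-- ===== SOURCE B (Python) =====
-- def _parse_efigure_legends(figure_legends_md: str) -> dict[str, str]:
--     """
--     Returns mapping like {"eFigure 1": "<legend text>", ...}.
--     """
--     def is_header(line: str) -> bool:
--         return line.startswith("## eFigure ")
--
--     def key_of(line: str) -> str:
--         return line.removeprefix("## ").split(".", 1)[0].strip()
--
--     lines = figure_legends_md.splitlines()
--     # drop everything before the first header
--     while lines and not is_header(lines[0]):
--         lines = lines[1:]
--     out: dict[str, str] = {}
--     # consume one (header, body) segment per step
--     while lines:
--         j = 1
--         while j < len(lines) and not is_header(lines[j]):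
--             j += 1
--         out[key_of(lines[0])] = "\n".join(lines[1:j]).strip()
--         lines = lines[j:]
--     return out
-- ===== Notes on version B (the rewrite author's own statement) =====
-- stated objective: alternative
-- what changed: Replaces A's single stateful line-by-line pass (a dict of line lists with a 'current' pointer, appended to per line, then joined in a final comprehension) by a segment decomposition: drop the preamble, then repeatedly take one header and scan forward to the next header, slicing the body lines and assigning the joined, stripped legend directly into the dict.
import Mathlib
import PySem

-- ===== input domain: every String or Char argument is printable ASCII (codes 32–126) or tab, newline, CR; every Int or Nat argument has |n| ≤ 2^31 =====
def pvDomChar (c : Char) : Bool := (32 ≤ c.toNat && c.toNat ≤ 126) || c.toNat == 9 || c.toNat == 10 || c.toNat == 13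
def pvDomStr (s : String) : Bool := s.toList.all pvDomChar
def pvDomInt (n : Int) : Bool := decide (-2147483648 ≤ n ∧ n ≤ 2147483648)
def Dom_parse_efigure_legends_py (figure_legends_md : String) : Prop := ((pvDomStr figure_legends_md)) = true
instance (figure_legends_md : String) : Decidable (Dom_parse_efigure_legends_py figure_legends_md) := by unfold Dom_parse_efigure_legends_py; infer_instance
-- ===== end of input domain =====

-- B replaces A's stateful line-by-line dict-of-line-lists pass by a header-to-header segment
-- decomposition (different decomposition, same cost); return value only, no mutation involved.

-- shared by both ports: the header test and the key extraction
-- 'line.startswith("## eFigure ")'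
def pvHdr (line : String) : Bool := PySem.Str.startswith line "## eFigure "
-- 'line.removeprefix("## ").split(".", 1)[0].strip()'
def pvKeyOf (line : String) : String :=
  let r := if PySem.Str.startswith line "## " then PySem.Str.slice line (some 3) none else line
  PySem.Str.strip (String.ofList ((PySem.Chars.splitOnMax r.toList ['.'] 1).headI))

-- ===== PORT A =====
-- one iteration of A's for-loop; state = (out, current)
def pvAStep (st : PySem.Dict String (List String) × Option String) (line : String) :
    PySem.Dict String (List String) × Option String :=
  if pvHdr line then
    let cur := pvKeyOf line
    (st.1.insert cur [], some cur)
  else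
    match st.2 with
    | none => st
    | some c => (st.1.modify c [] (fun v => v ++ [line]), st.2)

def parse_efigure_legends_py (figure_legends_md : String) : List (String × String) :=
  let st := (PySem.Str.splitlines figure_legends_md).foldl pvAStep (PySem.Dict.empty, none)
  st.1.items.map (fun kv => (kv.1, PySem.Str.strip (PySem.Str.join "\n" kv.2)))

-- ===== PORT B =====
-- B's outer while-loop: consume one (header, body) segment per step
def pvBGo : List String → PySem.Dict String String → PySem.Dict String String
  | [], out => out
  | h :: rest, out =>
    let body := rest.takeWhile (fun l => !pvHdr l)          -- lines[1:j]
    pvBGo (rest.dropWhile (fun l => !pvHdr l))              -- lines = lines[j:]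
      (out.insert (pvKeyOf h) (PySem.Str.strip (PySem.Str.join "\n" body)))
termination_by lines _ => lines.length
decreasing_by
  exact Nat.lt_succ_of_le (List.length_dropWhile_le _ _)

def parse_efigure_legends_py_alt (figure_legends_md : String) : List (String × String) :=
  -- drop everything before the first header, then fold over the segments
  (pvBGo ((PySem.Str.splitlines figure_legends_md).dropWhile (fun l => !pvHdr l))
    PySem.Dict.empty).items

-- ===== PRECONDITION & SPEC =====
def Spec_parse_efigure_legends_py (figure_legends_md : String) (out : List (String × String)) : Prop := out = parse_efigure_legends_py_alt figure_legends_md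
instance (figure_legends_md : String) (out : List (String × String)) : Decidable (Spec_parse_efigure_legends_py figure_legends_md out) := by unfold Spec_parse_efigure_legends_py; infer_instance

-- ===== CLAIM (what is proved, stated in full; the proofs are below) =====
def Claim_equal_parse_efigure_legends_py : Prop := ∀ (figure_legends_md : String), Dom_parse_efigure_legends_py figure_legends_md → Spec_parse_efigure_legends_py figure_legends_md (parse_efigure_legends_py figure_legends_md)

-- ===== LEMMAS AND PROOFS =====

-- A's final dict comprehension, applied to one item / to a whole A-side dict
def pvFin (kv : String × List String) : String × String :=
  (kv.1, PySem.Str.strip (PySem.Str.join "\n" kv.2))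

def pvMapD (d : PySem.Dict String (List String)) : PySem.Dict String String :=
  PySem.Dict.mk (d.items.map pvFin)

theorem pvContains_pvMapD (d : PySem.Dict String (List String)) (k : String) :
    (pvMapD d).contains k = d.contains k := by
  simp [pvMapD, PySem.Dict.contains, List.any_map, Function.comp_def, pvFin]

theorem pvMapD_insert (d : PySem.Dict String (List String)) (k : String) (v : List String) :
    pvMapD (d.insert k v) = (pvMapD d).insert k (PySem.Str.strip (PySem.Str.join "\n" v)) := by
  have hc := pvContains_pvMapD d k
  apply PySem.Dict.ext
  by_cases h : d.contains k = true
  · rw [PySem.Dict.items_insert_of_contains _ _ (by rw [hc]; exact h)]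
    show (d.insert k v).items.map pvFin = (d.items.map pvFin).map _
    rw [PySem.Dict.items_insert_of_contains _ _ h, List.map_map, List.map_map]
    refine List.map_congr_left ?_
    intro p _
    by_cases hp : p.1 = k <;> simp [pvFin, hp]
  · rw [PySem.Dict.items_insert_of_not_contains _ _ (by rw [hc]; simpa using h)]
    show (d.insert k v).items.map pvFin = d.items.map pvFin ++ _
    rw [PySem.Dict.items_insert_of_not_contains _ _ (by simpa using h)]
    simp [pvFin]

theorem pvA_skip (lines : List String) (d : PySem.Dict String (List String) × Option String)
    (hd : d.2 = none) :
    lines.foldl pvAStep d = (lines.dropWhile (fun l => !pvHdr l)).foldl pvAStep d := by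
  induction lines with
  | nil => rfl
  | cons l t ih =>
    by_cases h : pvHdr l = true
    · simp [h]
    · have hstep : pvAStep d l = d := by
        obtain ⟨d1, d2⟩ := d
        simp_all [pvAStep]
      simp [h, List.foldl_cons, hstep, ih]

theorem pvA_body (body : List String) (hb : ∀ l ∈ body, pvHdr l = false)
    (d : PySem.Dict String (List String)) (k : String) (acc : List String) :
    body.foldl pvAStep (d.insert k acc, some k) = (d.insert k (acc ++ body), some k) := by
  induction body generalizing acc with
  | nil => simp
  | cons b t ih =>
    have h1 : pvHdr b = false := hb b (List.mem_cons_self ..)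
    have hstep : pvAStep (d.insert k acc, some k) b = (d.insert k (acc ++ [b]), some k) := by
      simp [pvAStep, h1, PySem.Dict.modify, PySem.Dict.getD_insert_self,
        PySem.Dict.insert_insert_self]
    rw [List.foldl_cons, hstep, ih (fun l hl => hb l (List.mem_cons_of_mem _ hl))]
    simp

-- after dropWhile (!pvHdr), the list is empty or starts with a header
theorem pvDropWhile_shape (lines : List String) :
    (lines.dropWhile (fun l => !pvHdr l)) = [] ∨
      ∃ h t, lines.dropWhile (fun l => !pvHdr l) = h :: t ∧ pvHdr h = true := by
  induction lines with
  | nil => exact Or.inl rfl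
  | cons l t ih =>
    by_cases h : pvHdr l = true
    · exact Or.inr ⟨l, t, by simp [h], h⟩
    · simpa [h] using ih

theorem pvMain : ∀ (n : Nat) (lines : List String), lines.length ≤ n →
    (lines = [] ∨ ∃ h t, lines = h :: t ∧ pvHdr h = true) →
    ∀ (d : PySem.Dict String (List String)) (c : Option String),
      pvMapD (lines.foldl pvAStep (d, c)).1 = pvBGo lines (pvMapD d) := by
  intro n
  induction n with
  | zero =>
    intro lines hlen hshape d c
    have : lines = [] := List.eq_nil_of_length_eq_zero (Nat.le_zero.mp hlen)
    subst this; simp [pvBGo]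
  | succ n ih =>
    intro lines hlen hshape d c
    rcases hshape with h0 | ⟨h, t, rfl, hh⟩
    · subst h0; simp [pvBGo]
    · have hstep : pvAStep (d, c) h = (d.insert (pvKeyOf h) [], some (pvKeyOf h)) := by
        simp [pvAStep, hh]
      have hsplit := List.takeWhile_append_dropWhile (p := fun l => !pvHdr l) (l := t)
      have hbodyall : ∀ l ∈ t.takeWhile (fun l => !pvHdr l), pvHdr l = false := by
        intro l hl
        have := List.mem_takeWhile_imp hl
        simpa using this
      rw [List.foldl_cons, hstep]
      conv_lhs => rw [← hsplit]
      rw [List.foldl_append,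
        pvA_body _ hbodyall d (pvKeyOf h) []]
      have hrec := ih (t.dropWhile (fun l => !pvHdr l))
        (le_trans (List.length_dropWhile_le _ _) (Nat.le_of_succ_le_succ hlen))
        (pvDropWhile_shape t)
        (d.insert (pvKeyOf h) (List.nil ++ t.takeWhile (fun l => !pvHdr l)))
        (some (pvKeyOf h))
      rw [hrec, pvBGo, pvMapD_insert]
      simp

theorem parse_efigure_legends_py_eq (md : String) :
    parse_efigure_legends_py md = parse_efigure_legends_py_alt md := by
  unfold parse_efigure_legends_py parse_efigure_legends_py_alt
  have h1 := pvA_skip (PySem.Str.splitlines md) (PySem.Dict.empty, none) rfl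
  rw [h1]
  have h2 := pvMain ((PySem.Str.splitlines md).dropWhile (fun l => !pvHdr l)).length _
    (le_refl _) (pvDropWhile_shape _) PySem.Dict.empty none
  have h3 : pvMapD PySem.Dict.empty = PySem.Dict.empty := rfl
  rw [h3] at h2
  calc ((((PySem.Str.splitlines md).dropWhile (fun l => !pvHdr l)).foldl pvAStep
          (PySem.Dict.empty, none)).1).items.map
        (fun kv => (kv.1, PySem.Str.strip (PySem.Str.join "\n" kv.2)))
      = (pvMapD (((PySem.Str.splitlines md).dropWhile (fun l => !pvHdr l)).foldl pvAStep
          (PySem.Dict.empty, none)).1).items := rfl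
    _ = _ := by rw [h2]

-- ===== VERDICT (by name: the statement is the Claim_ definition above) =====
theorem parse_efigure_legends_py_spec : Claim_equal_parse_efigure_legends_py := by
  intro md _
  exact parse_efigure_legends_py_eq md
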